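-- pv_equiv track=rewrite | github.com/seanchatmangpt/weavergen | v2/weavergen/src/commands/mermaid.py | _workflow_to_state
-- ===== SOURCE A (Python) =====
-- def _workflow_to_state(workflow_data: dict) -> str:
--     """Convert workflow to state diagram"""
--
--     lines = ["stateDiagram-v2"]
--     lines.append("    [*] --> Initialize")
--
--     for i, task in enumerate(workflow_data.get("tasks", [])):
--         state_name = task["name"].replace(" ", "_")
--         if i == 0:
--             lines.append(f"    Initialize --> {state_name}")
--         else:
--             prev_state = workflow_data["tasks"][i-1]["name"].replace(" ", "_")
--             lines.append(f"    {prev_state} --> {state_name}")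
--
--     if workflow_data.get("tasks"):
--         last_state = workflow_data["tasks"][-1]["name"].replace(" ", "_")
--         lines.append(f"    {last_state} --> [*]")
--
--     return "\n".join(lines)
-- ===== SOURCE B (Python) =====
-- def _workflow_to_state(workflow_data: dict) -> str:
--     """Convert workflow to state diagram"""
--     states = [task["name"].replace(" ", "_") for task in workflow_data.get("tasks", [])]
--     nodes = ["[*]", "Initialize"] + states + (["[*]"] if states else [])
--     edges = [f"    {a} --> {b}" for a, b in zip(nodes, nodes[1:])]
--     return "\n".join(["stateDiagram-v2"] + edges)
-- ===== Notes on version B (the rewrite author's own statement) =====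
-- stated objective: simpler
-- what changed: Reformulates the diagram as one uniform node chain [*] -> Initialize -> states -> [*] and derives every output line as an adjacent-pair edge of that chain, eliminating A's three special-cased line constructions (i==0 branch, tasks[i-1] lookup, separate closing line).
import Mathlib
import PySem

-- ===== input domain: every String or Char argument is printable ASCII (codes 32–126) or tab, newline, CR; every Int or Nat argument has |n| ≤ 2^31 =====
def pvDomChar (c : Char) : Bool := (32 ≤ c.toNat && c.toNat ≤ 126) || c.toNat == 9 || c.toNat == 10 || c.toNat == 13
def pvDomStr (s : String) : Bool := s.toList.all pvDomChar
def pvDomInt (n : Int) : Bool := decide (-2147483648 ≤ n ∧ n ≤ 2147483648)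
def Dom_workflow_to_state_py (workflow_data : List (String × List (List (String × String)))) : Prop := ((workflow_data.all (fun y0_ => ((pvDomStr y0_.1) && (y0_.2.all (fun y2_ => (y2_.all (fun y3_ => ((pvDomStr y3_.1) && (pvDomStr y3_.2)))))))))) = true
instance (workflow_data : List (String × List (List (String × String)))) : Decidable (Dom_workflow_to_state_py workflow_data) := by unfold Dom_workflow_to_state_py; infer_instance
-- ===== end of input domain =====

-- ===== PORT A =====
-- B reformulates the diagram as one uniform node chain [*] -> Initialize -> states -> [*] and
-- derives every line as an adjacent-pair edge of that chain, removing A's three special-cased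
-- line constructions; objective: simpler. Equal output everywhere on Pre_.

-- dict.get(k, dflt) on an association list (first match), shared Python primitive
def pvGetKeyD {a : Type} (d : List (String × a)) (k : String) (dflt : a) : a :=
  (PySem.Dict.mk d).getD k dflt

-- task["name"].replace(" ", "_") as a char list (Pre_ guarantees the "name" key exists)
def pvStateName (task : List (String × String)) : List Char :=
  PySem.Chars.replace (pvGetKeyD task "name" "").toList [' '] ['_']

def workflow_to_state_py (workflow_data : List (String × List (List (String × String)))) : String :=
  -- workflow_data.get("tasks", []); later workflow_data["tasks"] reads the same (first-match) value
  let tasks := pvGetKeyD workflow_data "tasks" []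
  let lines : List (List Char) := ["stateDiagram-v2".toList, "    [*] --> Initialize".toList]
  -- for i, task in enumerate(...): append the i==0 line or the tasks[i-1] --> task line
  let lines := (PySem.List.enumerate tasks).foldl
    (fun lines p =>
      lines ++ [if p.1 = 0 then
          "    Initialize --> ".toList ++ pvStateName p.2
        else
          "    ".toList ++ pvStateName (PySem.List.pyGetD tasks (p.1 - 1) []) ++ " --> ".toList ++ pvStateName p.2])
    lines
  -- if workflow_data.get("tasks"): append the tasks[-1] --> [*] line
  let lines := if tasks = [] then lines
    else lines ++ ["    ".toList ++ pvStateName (PySem.List.pyGetD tasks (-1) []) ++ " --> [*]".toList]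
  String.ofList (PySem.Chars.join ['\n'] lines)

-- ===== PORT B =====
def workflow_to_state_py_alt (workflow_data : List (String × List (List (String × String)))) : String :=
  let states := (pvGetKeyD workflow_data "tasks" []).map pvStateName
  -- nodes = ["[*]", "Initialize"] + states + (["[*]"] if states else [])
  let nodes : List (List Char) :=
    ["[*]".toList, "Initialize".toList] ++ states ++ (if states.isEmpty then [] else ["[*]".toList])
  -- edges = one line per adjacent pair of the chain (zip(nodes, nodes[1:]))
  let edges := (nodes.zip nodes.tail).map
    (fun q => "    ".toList ++ q.1 ++ " --> ".toList ++ q.2)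
  String.ofList (PySem.Chars.join ['\n'] ("stateDiagram-v2".toList :: edges))

-- ===== PRECONDITION & SPEC =====
-- Pre_ : every task dict under "tasks" has a "name" key; A raises KeyError otherwise.
def Pre_workflow_to_state_py (workflow_data : List (String × List (List (String × String)))) : Prop :=
  ∀ task ∈ pvGetKeyD workflow_data "tasks" [], (PySem.Dict.mk task).contains "name" = true
instance (workflow_data : List (String × List (List (String × String)))) : Decidable (Pre_workflow_to_state_py workflow_data) := by unfold Pre_workflow_to_state_py; infer_instance

def pvWitness_workflow_to_state_py : (List (String × List (List (String × String)))) :=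
  [("tasks", [[("name", "load data")], [("name", "run tests")]])]

def Spec_workflow_to_state_py (workflow_data : List (String × List (List (String × String)))) (out : String) : Prop := out = workflow_to_state_py_alt workflow_data
instance (workflow_data : List (String × List (List (String × String)))) (out : String) : Decidable (Spec_workflow_to_state_py workflow_data out) := by unfold Spec_workflow_to_state_py; infer_instance

-- ===== CLAIM (what is proved, stated in full; the proofs are below) =====
def Claim_equal_workflow_to_state_py : Prop := ∀ (workflow_data : List (String × List (List (String × String)))), Dom_workflow_to_state_py workflow_data → Pre_workflow_to_state_py workflow_data → Spec_workflow_to_state_py workflow_data (workflow_to_state_py workflow_data)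

-- ===== LEMMAS AND PROOFS =====

-- A's loop over enumerate rest (front.length) with its tasks[i-1] lookups equals one zip pass
lemma pv_mapg {T B : Type} (h : T → T → B) (dflt : T) :
    ∀ (rest front : List T) (hf : front ≠ []),
    (PySem.List.enumerate rest (front.length : Int)).map
        (fun p => h (PySem.List.pyGetD (front ++ rest) (p.1 - 1) dflt) p.2)
      = ((front.getLast hf :: rest).zip rest).map (fun q => h q.1 q.2) := by
  intro rest
  induction rest with
  | nil => intro front hf; simp [PySem.List.enumerate_nil]
  | cons r rs ih =>
    intro front hf
    rw [PySem.List.enumerate_cons]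
    have hlen : (front.length : Int) - 1 = ((front.length - 1 : Nat) : Int) := by
      have : 1 ≤ front.length := List.length_pos_iff.mpr hf
      omega
    have hget : PySem.List.pyGetD (front ++ r :: rs) ((front.length : Int) - 1) dflt
        = front.getLast hf := by
      rw [hlen, PySem.List.pyGetD_natCast]
      have h1 : front.length - 1 < front.length := by
        have : 1 ≤ front.length := List.length_pos_iff.mpr hf
        omega
      rw [List.getD_eq_getElem?_getD, List.getElem?_append_left (by omega)]
      simp [List.getElem?_eq_getElem h1, List.getLast_eq_getElem]
    have ih' := ih (front ++ [r]) (by simp)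
    simp only [List.length_append, List.length_cons, List.length_nil, Nat.zero_add,
      List.append_assoc, List.cons_append, List.nil_append] at ih'
    push_cast at ih'
    simp only [List.map_cons, hget, List.zip_cons_cons, List.map_cons]
    congr 1
    rw [ih']
    congr 1
    simp

-- tasks[-1] is the last element
lemma pv_pyGetD_neg_one {T : Type} (t0 : T) (ts : List T) (d : T) :
    PySem.List.pyGetD (t0 :: ts) (-1) d = (t0 :: ts).getLast (by simp) := by
  simp only [PySem.List.pyGetD, PySem.List.pyGet?_neg_one]
  simp [List.getLast?_eq_some_getLast]

-- zipping a snoc-ed chain with its tail peels off the last edge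
lemma pv_zip_snoc {T : Type} : ∀ (xs : List T) (x z : T),
    (x :: (xs ++ [z])).zip (xs ++ [z])
      = (x :: xs).zip xs ++ [((x :: xs).getLast (by simp), z)] := by
  intro xs
  induction xs with
  | nil => intro x z; simp
  | cons y ys ih =>
    intro x z
    simp only [List.cons_append, List.zip_cons_cons]
    rw [ih y z]
    simp [List.getLast_cons]

-- ===== VERDICT (by name: the statement is the Claim_ definition above) =====
theorem workflow_to_state_py_spec : Claim_equal_workflow_to_state_py := by
  intro wd _hdom _hpre
  unfold Spec_workflow_to_state_py workflow_to_state_py workflow_to_state_py_alt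
  cases hts : pvGetKeyD wd "tasks" [] with
  | nil => dsimp only; simp [PySem.List.enumerate_nil]
  | cons t0 rest =>
    dsimp only
    rw [if_neg (by simp : ¬ (t0 :: rest = []))]
    rw [show PySem.List.enumerate (t0 :: rest) = (0, t0) :: PySem.List.enumerate rest 1 from
      PySem.List.enumerate_cons t0 rest 0]
    rw [List.foldl_cons, PySem.List.foldl_append_singleton_eq_map]
    have hmapdrop := List.map_congr_left (l := PySem.List.enumerate rest (1:Int))
      (f := fun p => if p.1 = 0 then "    Initialize --> ".toList ++ pvStateName p.2
        else "    ".toList ++ pvStateName (PySem.List.pyGetD (t0 :: rest) (p.1 - 1) []) ++ " --> ".toList ++ pvStateName p.2)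
      (g := fun p => (fun a b => "    ".toList ++ pvStateName a ++ " --> ".toList ++ pvStateName b)
        (PySem.List.pyGetD (([t0] : List _) ++ rest) (p.1 - 1) []) p.2)
      (by
        intro p hp
        rw [PySem.List.mem_enumerate_iff] at hp
        obtain ⟨k, hk, rfl⟩ := hp
        simp only [List.singleton_append]
        rw [if_neg (by omega)])
    simp only [hmapdrop]
    have hmg := pv_mapg (fun a b => "    ".toList ++ pvStateName a ++ " --> ".toList ++ pvStateName b) []
      rest [t0] (by simp)
    simp only [List.length_cons, List.length_nil, Nat.zero_add, Nat.cast_one,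
      List.getLast_singleton] at hmg
    rw [hmg]
    rw [pv_pyGetD_neg_one]
    -- B side: peel the chain's first two edges, then the last edge via pv_zip_snoc
    simp only [List.map_cons, List.isEmpty_cons, Bool.false_eq_true, if_false,
      List.cons_append, List.nil_append, List.tail_cons, List.zip_cons_cons]
    rw [pv_zip_snoc (List.map pvStateName rest) (pvStateName t0) ("[*]".toList)]
    have hzip : (pvStateName t0 :: List.map pvStateName rest).zip (List.map pvStateName rest)
        = ((t0 :: rest).zip rest).map (Prod.map pvStateName pvStateName) := by
      rw [← List.map_cons (f := pvStateName) (a := t0) (l := rest), List.zip_map]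
    have hlast : ∀ (h : pvStateName t0 :: List.map pvStateName rest ≠ []),
        (pvStateName t0 :: List.map pvStateName rest).getLast h
          = pvStateName ((t0 :: rest).getLast (by simp)) := by
      intro h
      exact List.getLast_map (f := pvStateName) (l := t0 :: rest) h
    simp only [hzip, hlast]
    simp [Function.comp_def, Prod.map]
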